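-- pv_equiv track=rewrite | github.com/BUAA-Lcy/GTA-UAV | Game4Loc/eval_topk_cached.py | circular_components
-- ===== SOURCE A (Python) =====
-- def circular_components(mask):
--     n = len(mask)
--     if n == 0:
--         return 0, []
--     if not any(mask):
--         return 0, []
--     if all(mask):
--         return 1, [n]
--     first_false = next(idx for idx, flag in enumerate(mask) if not flag)
--     ordered = mask[first_false + 1 :] + mask[: first_false + 1]
--     component_lengths = []
--     current_len = 0
--     for flag in ordered:
--         if flag:
--             current_len += 1
--         elif current_len > 0:
--             component_lengths.append(current_len)
--             current_len = 0
--     if current_len > 0: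
--         component_lengths.append(current_len)
--     return len(component_lengths), component_lengths
-- ===== SOURCE B (Python) =====
-- def circular_components(mask):
--     n = len(mask)
--     if n == 0:
--         return 0, []
--     if not any(mask):
--         return 0, []
--     if all(mask):
--         return 1, [n]
--     falses = [i for i, f in enumerate(mask) if not f]
--     m = len(falses)
--     lengths = []
--     for j in range(m):
--         gap = (falses[(j + 1) % m] - falses[j] - 1) % n
--         if gap > 0:
--             lengths.append(gap)
--     return len(lengths), lengths
-- ===== Notes on version B (the rewrite author's own statement) =====
-- stated objective: alternative
-- what changed: B never builds the rotated copy of the mask and never run-length-scans it: it collects the indices of the False entries once and derives each run length as the circular gap (falses[(j+1)%m]-falses[j]-1) % n between consecutive False positions.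
import Mathlib
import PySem

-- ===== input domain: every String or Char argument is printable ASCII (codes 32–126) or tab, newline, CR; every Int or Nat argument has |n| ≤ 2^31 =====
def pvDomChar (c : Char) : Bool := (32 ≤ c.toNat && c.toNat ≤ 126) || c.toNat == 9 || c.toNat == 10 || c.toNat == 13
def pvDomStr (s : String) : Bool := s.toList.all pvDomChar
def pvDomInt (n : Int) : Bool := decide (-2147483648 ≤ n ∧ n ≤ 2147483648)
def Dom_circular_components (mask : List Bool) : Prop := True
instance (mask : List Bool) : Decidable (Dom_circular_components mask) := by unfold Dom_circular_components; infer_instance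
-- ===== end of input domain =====

-- B computes each circular run length as the gap between consecutive False indices instead of
-- rotating the mask and run-length-scanning it; same value everywhere (objective: alternative).

-- ===== PORT A =====
-- loop body of A's 'for flag in ordered' scan
def ccStep (s : List Int × Int) (flag : Bool) : List Int × Int :=
  if flag then (s.1, s.2 + 1)
  else if 0 < s.2 then (s.1 ++ [s.2], 0) else s

def circular_components (mask : List Bool) : Int × List Int :=
  let n : Int := mask.length
  if mask.length = 0 then (0, [])
  else if mask.any (fun x => x) = false then (0, [])
  else if mask.all (fun x => x) = true then (1, [n])
  else
    -- next(idx for idx, flag in enumerate(mask) if not flag): first index with a False flag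
    -- (a False exists in this branch, so findIdx is exactly that generator's value)
    let ff : Nat := mask.findIdx (fun flag => !flag)
    let ordered := PySem.List.slice mask (some ((ff : Int) + 1)) none ++
                   PySem.List.slice mask none (some ((ff : Int) + 1))
    let s := ordered.foldl ccStep ([], 0)
    let cl := if 0 < s.2 then s.1 ++ [s.2] else s.1
    ((cl.length : Int), cl)

-- ===== PORT B =====
def circular_components_alt (mask : List Bool) : Int × List Int :=
  let n : Int := mask.length
  if mask.length = 0 then (0, [])
  else if mask.any (fun x => x) = false then (0, [])
  else if mask.all (fun x => x) = true then (1, [n])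
  else
    let falses : List Int := ((PySem.List.enumerate mask 0).filter (fun p => !p.2)).map (fun p => p.1)
    let m : Int := falses.length
    -- falses[(j+1) % m] and falses[j] are always in range, so pyGetD is exact here
    let lengths := (PySem.List.pyRange 0 m 1).foldl (fun acc j =>
      let gap := PySem.Int.mod (PySem.List.pyGetD falses (PySem.Int.mod (j + 1) m) 0 -
                                PySem.List.pyGetD falses j 0 - 1) n
      if 0 < gap then acc ++ [gap] else acc) ([] : List Int)
    ((lengths.length : Int), lengths)

-- ===== PRECONDITION & SPEC =====
def Spec_circular_components (mask : List Bool) (out : Int × List Int) : Prop := out = circular_components_alt mask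
instance (mask : List Bool) (out : Int × List Int) : Decidable (Spec_circular_components mask out) := by unfold Spec_circular_components; infer_instance

-- ===== CLAIM (what is proved, stated in full; the proofs are below) =====
def Claim_equal_circular_components : Prop := ∀ (mask : List Bool), Dom_circular_components mask → Spec_circular_components mask (circular_components mask)

-- ===== LEMMAS AND PROOFS =====

-- positions of the False entries, as Nats
def falsesN : List Bool → List Nat
  | [] => []
  | true :: l => (falsesN l).map (· + 1)
  | false :: l => 0 :: (falsesN l).map (· + 1)

-- run lengths of r ++ (replicate t true ++ [false]) in order
def gapsR : List Bool → Nat → List Nat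
  | [], t => [t]
  | true :: r, t =>
      let gs := gapsR r t
      (gs.headD 0 + 1) :: gs.tail
  | false :: r, t => 0 :: gapsR r t

-- the list T(g1) F T(g2) F … T(gk) F
def blocks : List Nat → List Bool
  | [] => []
  | g :: gs => List.replicate g true ++ false :: blocks gs

theorem gapsR_ne_nil (r : List Bool) (t : Nat) : gapsR r t ≠ [] := by
  cases r with
  | nil => simp [gapsR]
  | cons b r => cases b <;> simp [gapsR]

theorem gapsR_cons_head_tail (r : List Bool) (t : Nat) :
    gapsR r t = (gapsR r t).headD 0 :: (gapsR r t).tail := by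
  cases h : gapsR r t with
  | nil => exact absurd h (gapsR_ne_nil r t)
  | cons g gs => simp

theorem blocks_gapsR (r : List Bool) (t : Nat) :
    r ++ (List.replicate t true ++ [false]) = blocks (gapsR r t) := by
  induction r with
  | nil => simp [gapsR, blocks]
  | cons b r ih =>
    cases b with
    | false => simpa [gapsR, blocks] using ih
    | true =>
      show true :: (r ++ (List.replicate t true ++ [false])) = _
      rw [ih, gapsR_cons_head_tail r t]
      simp [gapsR, blocks, List.replicate_succ]

theorem scan_replicate (k : Nat) (acc : List Int) (cur : Int) :
    (List.replicate k true).foldl ccStep (acc, cur) = (acc, cur + k) := by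
  induction k generalizing cur with
  | zero => simp
  | succ k ih =>
    rw [List.replicate_succ, List.foldl_cons]
    show (List.replicate k true).foldl ccStep (acc, cur + 1) = _
    rw [ih]
    congr 1
    push_cast
    ring

theorem scan_blocks (gs : List Nat) (acc : List Int) :
    (blocks gs).foldl ccStep (acc, 0) =
      (acc ++ (gs.filter (fun g => 0 < g)).map (fun (g : Nat) => (g : Int)), 0) := by
  induction gs generalizing acc with
  | nil => simp [blocks]
  | cons g gs ih =>
    rw [blocks, List.foldl_append, scan_replicate, List.foldl_cons]
    have hstep : ccStep (acc, 0 + (g : Int)) false =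
        ((if 0 < g then acc ++ [(g : Int)] else acc), 0) := by
      simp only [ccStep, zero_add]
      split_ifs with h1 h2 h2 <;> simp_all
    rw [hstep]
    by_cases hg : 0 < g
    · simp only [hg, if_pos, ih, List.filter_cons]
      simp [List.append_assoc]
    · simp only [hg, if_neg, not_false_iff, ih, List.filter_cons]
      simp

theorem falsesN_enum (l : List Bool) (s : Int) :
    ((PySem.List.enumerate l s).filter (fun p => !p.2)).map (fun p => p.1) =
      (falsesN l).map (fun (k : Nat) => s + (k : Int)) := by
  induction l generalizing s with
  | nil => simp [PySem.List.enumerate_nil, falsesN]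
  | cons b l ih =>
    cases b with
    | true =>
      rw [PySem.List.enumerate_cons]
      simp only [List.filter_cons, Bool.not_true, falsesN]
      rw [if_neg (by simp)]
      rw [ih, List.map_map]
      apply List.map_congr_left
      intro k _
      simp only [Function.comp_apply]
      push_cast
      omega
    | false =>
      rw [PySem.List.enumerate_cons]
      simp only [List.filter_cons, Bool.not_false, if_pos, falsesN]
      rw [List.map_cons, ih]
      simp only [List.map_cons, List.map_map]
      congr 1
      · norm_num
      · apply List.map_congr_left
        intro k _
        simp only [Function.comp_apply]
        push_cast
        omega

theorem falsesN_append (a : Nat) (r : List Bool) :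
    falsesN (List.replicate a true ++ false :: r) = a :: (falsesN r).map (· + (a + 1)) := by
  induction a with
  | zero => simp [falsesN]
  | succ a ih =>
    rw [List.replicate_succ, List.cons_append]
    show (falsesN (List.replicate a true ++ false :: r)).map (· + 1) = _
    rw [ih]
    simp only [List.map_cons, List.map_map]
    congr 1

theorem falsesN_lt (l : List Bool) : ∀ x ∈ falsesN l, x < l.length := by
  induction l with
  | nil => simp [falsesN]
  | cons b l ih =>
    cases b <;> simp only [falsesN, List.length_cons] <;> intro x hx
    · rcases List.mem_cons.mp hx with rfl | hx
      · omega
      · rcases List.mem_map.mp hx with ⟨k, hk, rfl⟩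
        exact Nat.succ_lt_succ (ih k hk)
    · rcases List.mem_map.mp hx with ⟨k, hk, rfl⟩
      exact Nat.succ_lt_succ (ih k hk)

theorem falsesN_sorted (l : List Bool) : (falsesN l).Pairwise (· < ·) := by
  induction l with
  | nil => simp [falsesN]
  | cons b l ih =>
    cases b with
    | true =>
      simp only [falsesN]
      exact ih.map _ (fun a b h => by omega)
    | false =>
      simp only [falsesN]
      refine List.Pairwise.cons ?_ (ih.map _ (fun a b h => by omega))
      intro y hy
      rcases List.mem_map.mp hy with ⟨k, _, rfl⟩
      omega

-- shift invariance of the gap zipWith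
theorem zipWith_gap_shift (A B : List Int) :
    List.zipWith (fun x p => x - p - 1) (A.map (· + 1)) (B.map (· + 1)) =
      List.zipWith (fun x p => x - p - 1) A B := by
  induction A generalizing B with
  | nil => simp
  | cons a A ih =>
    cases B with
    | nil => simp
    | cons b B =>
      simp only [List.map_cons, List.zipWith_cons_cons, ih]
      congr 1
      ring

-- gapsR expressed through the False positions
theorem map_cast_add_one (l : List Nat) :
    (l.map (· + 1)).map (fun (k : Nat) => (k : Int)) =
      (l.map (fun (k : Nat) => (k : Int))).map (· + 1) := by
  simp only [List.map_map]
  apply List.map_congr_left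
  intro k _
  simp only [Function.comp_apply]
  push_cast
  ring

theorem gapsR_eq_zipWith (r : List Bool) (t : Nat) :
    (gapsR r t).map (fun (g : Nat) => (g : Int)) =
      List.zipWith (fun x p => x - p - 1)
        ((falsesN r).map (fun (k : Nat) => (k : Int)) ++ [((r.length + t : Nat) : Int)])
        ((-1) :: (falsesN r).map (fun (k : Nat) => (k : Int))) := by
  induction r with
  | nil =>
    simp [gapsR, falsesN]
  | cons b r ih =>
    have he : ((r.length + 1 + t : Nat) : Int) = ((r.length + t : Nat) : Int) + 1 := by
      push_cast; ring
    cases b with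
    | false =>
      simp only [gapsR, falsesN, List.map_cons, List.length_cons]
      rw [map_cast_add_one, he]
      rw [List.cons_append, List.zipWith_cons_cons]
      have h1 : ((falsesN r).map (fun (k : Nat) => (k : Int))).map (· + 1) ++
            [((r.length + t : Nat) : Int) + 1] =
          ((falsesN r).map (fun (k : Nat) => (k : Int)) ++
            [((r.length + t : Nat) : Int)]).map (· + 1) := by
        simp
      have h2 : ((0 : Nat) : Int) :: ((falsesN r).map (fun (k : Nat) => (k : Int))).map (· + 1) =
          ((-1 : Int) :: (falsesN r).map (fun (k : Nat) => (k : Int))).map (· + 1) := by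
        simp
      rw [h1, h2, zipWith_gap_shift, ih]
      congr 1
    | true =>
      cases hg : gapsR r t with
      | nil => exact absurd hg (gapsR_ne_nil r t)
      | cons g gs =>
        have ihx := ih
        rw [hg] at ihx
        have hL : (gapsR (true :: r) t).map (fun (g : Nat) => (g : Int)) =
            ((g : Int) + 1) :: gs.map (fun (g : Nat) => (g : Int)) := by
          simp [gapsR, hg]
        rw [hL]
        simp only [falsesN, List.length_cons]
        rw [map_cast_add_one, he]
        cases hB : (falsesN r).map (fun (k : Nat) => (k : Int)) ++
            [((r.length + t : Nat) : Int)] with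
        | nil => simp at hB
        | cons b0 B' =>
          rw [hB] at ihx
          have hmapped : ((falsesN r).map (fun (k : Nat) => (k : Int))).map (· + 1) ++
              [((r.length + t : Nat) : Int) + 1] = (b0 + 1) :: B'.map (· + 1) := by
            rw [show ((falsesN r).map (fun (k : Nat) => (k : Int))).map (· + 1) ++
                [((r.length + t : Nat) : Int) + 1] =
                ((falsesN r).map (fun (k : Nat) => (k : Int)) ++
                  [((r.length + t : Nat) : Int)]).map (· + 1) by simp, hB]
            simp
          rw [hmapped]
          rw [List.zipWith_cons_cons] at ihx ⊢
          rw [zipWith_gap_shift] at *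
          simp only [List.map_cons, List.cons.injEq] at ihx
          obtain ⟨hg0, hgs⟩ := ihx
          simp only [List.cons.injEq]
          refine ⟨by omega, hgs⟩

-- filter/map transfer from the Int list to the Nat list
theorem filter_map_cast (l : List α) (f : α → Int) (gs : List Nat)
    (h : l.map f = gs.map (fun (g : Nat) => (g : Int))) :
    (l.filter (fun x => decide (0 < f x))).map f =
      (gs.filter (fun g => decide (0 < g))).map (fun (g : Nat) => (g : Int)) := by
  induction l generalizing gs with
  | nil => cases gs <;> simp_all
  | cons x l ih =>
    cases gs with
    | nil => simp_all
    | cons g gs =>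
      simp only [List.map_cons, List.cons.injEq] at h
      obtain ⟨hx, hrest⟩ := h
      have hpos : (0 < f x) ↔ (0 < g) := by rw [hx]; exact Int.natCast_pos
      simp only [List.filter_cons]
      by_cases hg : 0 < g
      · rw [if_pos (by simpa using hpos.mpr hg), if_pos (by simpa using hg)]
        simp [hx, ih gs hrest]
      · rw [if_neg (by simpa using fun h => hg (hpos.mp h)), if_neg (by simpa using hg)]
        exact ih gs hrest

theorem decomp_of_all_false (mask : List Bool) (h : mask.all (fun x => x) = false) :
    ∃ a r, mask = List.replicate a true ++ false :: r ∧
      mask.findIdx (fun f => !f) = a := by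
  induction mask with
  | nil => simp at h
  | cons b l ih =>
    cases b with
    | false => exact ⟨0, l, by simp, by simp [List.findIdx_cons]⟩
    | true =>
      simp only [List.all_cons, Bool.true_and] at h
      obtain ⟨a, r, hl, hf⟩ := ih h
      exact ⟨a + 1, r, by simp [hl, List.replicate_succ],
        by simp [List.findIdx_cons, hf]⟩

theorem emod_neg_small (v n : Int) (_h0 : 0 < n) (h1 : -n ≤ v) (h2 : v < 0) :
    v % n = v + n := by
  have h3 : (v + n) % n = v % n := by
    have h := Int.add_mul_emod_self_left (a := v) (b := n) (c := 1)
    simp only [mul_one] at h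
    exact h
  rw [← h3, Int.emod_eq_of_lt (by omega) (by omega)]

theorem last_rel (a : Nat) (hs : List Nat) :
    (((a :: hs.map (· + (a + 1)))[hs.length]'(by simp) : Nat) : Int) =
      (((-1 : Int) :: hs.map (fun (k : Nat) => (k : Int)))[hs.length]'(by simp)) + (a : Int) + 1 := by
  cases hs with
  | nil => simp
  | cons f0 fs =>
    simp only [List.length_cons, List.getElem_cons_succ, List.getElem_map]
    push_cast
    ring

theorem last_bounds (hs : List Nat) (rl : Nat) (hlt : ∀ x ∈ hs, x < rl) :
    (((-1 : Int) :: hs.map (fun (k : Nat) => (k : Int)))[hs.length]'(by simp)) < (rl : Int) ∧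
      (-1 : Int) ≤ (((-1 : Int) :: hs.map (fun (k : Nat) => (k : Int)))[hs.length]'(by simp)) := by
  cases hs with
  | nil =>
    refine ⟨?_, by simp⟩
    show (-1 : Int) < (rl : Int)
    omega
  | cons f0 fs =>
    simp only [List.length_cons, List.getElem_cons_succ, List.getElem_map]
    have hm := hlt ((f0 :: fs)[fs.length]) (List.getElem_mem (by simp))
    constructor
    · exact_mod_cast hm
    · omega

theorem findIdx_rep (a : Nat) (r : List Bool) :
    (List.replicate a true ++ false :: r).findIdx (fun f => !f) = a := by
  induction a with
  | zero => simp [List.findIdx_cons]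
  | succ a ih => simp [List.replicate_succ, List.findIdx_cons, ih]

theorem key_map (a : Nat) (r : List Bool) :
    (PySem.List.pyRange 0 ((((falsesN r).length + 1 : Nat) : Int)) 1).map (fun j =>
        PySem.Int.mod
          (PySem.List.pyGetD ((a :: (falsesN r).map (· + (a + 1))).map (fun (k : Nat) => (k : Int)))
              (PySem.Int.mod (j + 1) ((((falsesN r).length + 1 : Nat) : Int))) 0 -
           PySem.List.pyGetD ((a :: (falsesN r).map (· + (a + 1))).map (fun (k : Nat) => (k : Int))) j 0 - 1)
          (((a + 1 + r.length : Nat) : Int))) =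
      (gapsR r a).map (fun (g : Nat) => (g : Int)) := by
  have hsort := falsesN_sorted r
  have hlt : ∀ i (h : i < (falsesN r).length), (falsesN r)[i] < r.length :=
    fun i h => falsesN_lt r _ (List.getElem_mem h)
  have hso : ∀ i (h : i + 1 < (falsesN r).length), (falsesN r)[i] < (falsesN r)[i+1] :=
    fun i h => (List.pairwise_iff_getElem.mp hsort) i (i+1) (by omega) h (by omega)
  rw [gapsR_eq_zipWith]
  apply List.ext_getElem
  · simp [PySem.List.length_pyRange_one]
  · intro k h1 h2
    have hk : k < (falsesN r).length + 1 := by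
      simpa [PySem.List.length_pyRange_one] using h1
    simp only [List.getElem_map, PySem.List.getElem_pyRange_one, List.getElem_zipWith]
    have hidx : PySem.Int.mod ((0 : Int) + (k : Int) + 1) ((((falsesN r).length + 1 : Nat) : Int)) =
        (((k + 1) % ((falsesN r).length + 1) : Nat) : Int) := by
      have h : ((0 : Int) + (k : Int) + 1) = (((k + 1 : Nat)) : Int) := by push_cast; ring
      rw [h, PySem.Int.mod_natCast]
    have hget : ∀ (j : Nat) (hj : j < (falsesN r).length + 1),
        PySem.List.pyGetD ((a :: (falsesN r).map (· + (a + 1))).map (fun (k : Nat) => (k : Int)))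
          ((j : Nat) : Int) 0 =
        (((a :: (falsesN r).map (· + (a + 1)))[j]'(by simpa using hj) : Nat) : Int) := by
      intro j hj
      rw [PySem.List.pyGetD_natCast]
      rw [List.getD_eq_getElem _ _ (by simpa using hj)]
      rw [List.getElem_map]
    have h0k : ((0 : Int) + (k : Int)) = ((k : Nat) : Int) := by ring
    rw [hidx, h0k, hget k hk]
    by_cases hin : k < (falsesN r).length
    · -- interior gap
      have hmodidx : (k + 1) % ((falsesN r).length + 1) = k + 1 := Nat.mod_eq_of_lt (by omega)
      rw [hmodidx, hget (k+1) (by omega)]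
      have hgA : ((falsesN r).map (fun (k : Nat) => (k : Int)) ++
          [((r.length + a : Nat) : Int)])[k]'(by simpa using by omega) =
          (((falsesN r)[k]'hin : Nat) : Int) := by
        rw [List.getElem_append_left (by simpa using hin)]
        simp
      rw [hgA]
      cases k with
      | zero =>
        have e1 : (a :: (falsesN r).map (· + (a + 1)))[0] = a := rfl
        have e2 : (a :: (falsesN r).map (· + (a + 1)))[1]'(by simpa using by omega) =
            (falsesN r)[0]'hin + (a + 1) := by
          simp
        rw [e1, e2]
        have hb := hlt 0 hin
        rw [PySem.Int.mod_eq_emod_of_pos (by push_cast; omega)]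
        rw [Int.emod_eq_of_lt (by push_cast; omega) (by push_cast; omega)]
        simp only [List.getElem_cons_zero]
        push_cast
        ring
      | succ i =>
        have e1 : (a :: (falsesN r).map (· + (a + 1)))[i+1]'(by simpa using by omega) =
            (falsesN r)[i]'(by omega) + (a + 1) := by simp
        have e2 : (a :: (falsesN r).map (· + (a + 1)))[i+2]'(by simpa using by omega) =
            (falsesN r)[i+1]'hin + (a + 1) := by simp
        rw [e1, e2]
        have hmono := hso i hin
        have hb := hlt (i+1) hin
        rw [PySem.Int.mod_eq_emod_of_pos (by push_cast; omega)]
        rw [Int.emod_eq_of_lt (by push_cast; omega) (by push_cast; omega)]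
        have e3 : ((-1 : Int) :: (falsesN r).map (fun (k : Nat) => (k : Int)))[i+1]'(by simpa using by omega) =
            (((falsesN r)[i]'(by omega) : Nat) : Int) := by simp
        rw [e3]
        push_cast
        ring
    · -- wrap-around gap: k = (falsesN r).length
      have hkl : k = (falsesN r).length := by omega
      subst hkl
      have hmodidx : ((falsesN r).length + 1) % ((falsesN r).length + 1) = 0 := Nat.mod_self _
      rw [hmodidx, hget 0 (by omega)]
      have e0 : (a :: (falsesN r).map (· + (a + 1)))[0] = a := rfl
      rw [e0]
      have hgA : ((falsesN r).map (fun (k : Nat) => (k : Int)) ++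
          [((r.length + a : Nat) : Int)])[(falsesN r).length]'(by simp) =
          ((r.length + a : Nat) : Int) := by
        rw [List.getElem_append_right (by simp)]
        simp
      rw [hgA]
      rw [last_rel a (falsesN r)]
      have hb := last_bounds (falsesN r) r.length (fun x hx => falsesN_lt r x hx)
      rw [PySem.Int.mod_eq_emod_of_pos (by push_cast; omega)]
      rw [emod_neg_small _ _ (by push_cast; omega) (by push_cast; omega) (by omega)]
      push_cast
      push_cast at hb
      omega

theorem main_eq (a : Nat) (r : List Bool)
    (h1 : ¬ (List.replicate a true ++ false :: r).any (fun x => x) = false)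
    (h2 : ¬ (List.replicate a true ++ false :: r).all (fun x => x) = true) :
    circular_components (List.replicate a true ++ false :: r) =
      circular_components_alt (List.replicate a true ++ false :: r) := by
  have h0 : ¬ (List.replicate a true ++ false :: r).length = 0 := by simp
  simp only [circular_components, circular_components_alt]
  rw [if_neg h0, if_neg h1, if_neg h2, if_neg h0, if_neg h1, if_neg h2]
  have hM2 : List.replicate a true ++ false :: r = (List.replicate a true ++ [false]) ++ r := by
    simp
  have hcast : ((List.replicate a true ++ false :: r).findIdx (fun flag => !flag) : Int) + 1 =
      ((a + 1 : Nat) : Int) := by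
    rw [findIdx_rep]; push_cast; ring
  rw [hcast, PySem.List.slice_from_natCast, PySem.List.slice_to_natCast]
  rw [show (List.replicate a true ++ false :: r).drop (a + 1) = r from by
    rw [hM2]; exact List.drop_left' (by simp)]
  rw [show (List.replicate a true ++ false :: r).take (a + 1) = List.replicate a true ++ [false] from by
    rw [hM2]; exact List.take_left' (by simp)]
  rw [blocks_gapsR r a, scan_blocks]
  rw [falsesN_enum]
  rw [show (fun (k : Nat) => (0 : Int) + (k : Int)) = (fun (k : Nat) => (k : Int)) from by
    funext k; ring]
  rw [falsesN_append]
  rw [show ((a :: (falsesN r).map (· + (a + 1))).map (fun (k : Nat) => (k : Int))).length =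
      (falsesN r).length + 1 from by simp]
  rw [show (List.replicate a true ++ false :: r).length = a + 1 + r.length from by
    simp; omega]
  rw [PySem.List.foldl_append_ite]
  have hfm := filter_map_cast _ _ _ (key_map a r)
  rw [hfm]
  simp

-- ===== VERDICT (by name: the statement is the Claim_ definition above) =====
theorem circular_components_spec : Claim_equal_circular_components := by
  intro mask _
  unfold Spec_circular_components
  by_cases h0 : mask.length = 0
  · simp [circular_components, circular_components_alt, h0]
  by_cases h1 : mask.any (fun x => x) = false
  · simp only [circular_components, circular_components_alt]
    rw [if_neg h0, if_pos h1, if_neg h0, if_pos h1]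
  by_cases h2 : mask.all (fun x => x) = true
  · simp only [circular_components, circular_components_alt]
    rw [if_neg h0, if_neg h1, if_pos h2, if_neg h0, if_neg h1, if_pos h2]
  · obtain ⟨a, r, hm, -⟩ := decomp_of_all_false mask (by simpa using h2)
    subst hm
    exact main_eq a r h1 h2
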